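-- pv_equiv track=rewrite | github.com/kapishps/AlgoDS | HackerEarth/Contests/August Circuits '20/subset in sequence.py | solve
-- ===== SOURCE A (Python) =====
-- def solve(n):
--     bits = []
--     nums = []
--     while n > 0:
--         if n%2 == 1:
--             bits.append(1)
--         else:
--             bits.append(0)
--         n //= 2
--
--     for i in range(len(bits)):
--         if bits[i] == 1:
--             nums.append(str(3**i))
--     return nums
-- ===== SOURCE B (Python) =====
-- def solve(n):
--     nums = []
--     pow3 = 1
--     while n > 0:
--         if n % 2 == 1:
--             nums.append(str(pow3))
--         pow3 *= 3
--         n //= 2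
--     return nums
-- ===== Notes on version B (the rewrite author's own statement) =====
-- stated objective: simpler
-- what changed: B fuses A's two passes into one loop that maintains a running power of 3 and emits strings directly, eliminating the intermediate bits list and the indexed range scan.
import Mathlib
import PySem

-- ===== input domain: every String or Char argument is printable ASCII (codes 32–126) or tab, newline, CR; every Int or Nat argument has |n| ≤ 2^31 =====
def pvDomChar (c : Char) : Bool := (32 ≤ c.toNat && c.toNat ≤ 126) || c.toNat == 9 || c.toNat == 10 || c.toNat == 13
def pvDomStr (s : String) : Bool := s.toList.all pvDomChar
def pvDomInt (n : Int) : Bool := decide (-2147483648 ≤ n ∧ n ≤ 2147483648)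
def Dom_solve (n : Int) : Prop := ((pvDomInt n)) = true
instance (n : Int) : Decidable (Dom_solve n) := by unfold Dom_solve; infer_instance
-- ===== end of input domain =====

-- B fuses A's two passes (build a bits list, then scan it emitting 3**i) into one loop
-- with a running power of 3; return values are identical, objective: simpler.

-- ===== PORT A =====
lemma pvFloordiv2_lt (n : Int) (h : 0 < n) :
    (PySem.Int.floordiv n 2).toNat < n.toNat := by
  rw [PySem.Int.floordiv_eq_ediv_of_pos (by omega)]
  omega

-- the while loop of A, building the bits list
def solveBits (n : Int) : List Int :=
  if h : 0 < n then
    (if PySem.Int.mod n 2 = 1 then (1 : Int) else 0) :: solveBits (PySem.Int.floordiv n 2)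
  else []
termination_by n.toNat
decreasing_by exact pvFloordiv2_lt n h

-- 3**i: i ranges over range(len(bits)), so i ≥ 0 and 3 ^ i.toNat is exact
def solve (n : Int) : List String :=
  (PySem.List.pyRange 0 ((solveBits n).length : Int) 1).foldl
    (fun nums i =>
      if PySem.List.pyGetD (solveBits n) i 0 = 1 then nums ++ [PySem.Int.toStr (3 ^ i.toNat)] else nums)
    []

-- ===== PORT B =====
-- the single while loop of B: running pow3, accumulator nums
def solveAltLoop (n pow3 : Int) (nums : List String) : List String :=
  if h : 0 < n then
    solveAltLoop (PySem.Int.floordiv n 2) (pow3 * 3)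
      (nums ++ (if PySem.Int.mod n 2 = 1 then [PySem.Int.toStr pow3] else []))
  else nums
termination_by n.toNat
decreasing_by exact pvFloordiv2_lt n h

def solve_alt (n : Int) : List String := solveAltLoop n 1 []

-- ===== PRECONDITION & SPEC =====
def Spec_solve (n : Int) (out : List String) : Prop := out = solve_alt n
instance (n : Int) (out : List String) : Decidable (Spec_solve n out) := by unfold Spec_solve; infer_instance

-- ===== CLAIM (what is proved, stated in full; the proofs are below) =====
def Claim_equal_solve : Prop := ∀ (n : Int), Dom_solve n → Spec_solve n (solve n)

-- ===== LEMMAS AND PROOFS =====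

-- reference emission: strings str(3^k), str(3^(k+1)), … for the 1-bits of `bits`
def pvEmit (bits : List Int) (k : Nat) : List String :=
  match bits with
  | [] => []
  | b :: bs => (if b = 1 then [PySem.Int.toStr (3 ^ k)] else []) ++ pvEmit bs (k + 1)

lemma pvFoldA (bits : List Int) :
    ∀ (pre : List Int) (acc : List String),
    (PySem.List.pyRange (pre.length : Int) ((pre ++ bits).length : Int) 1).foldl
      (fun nums i =>
        if PySem.List.pyGetD (pre ++ bits) i 0 = 1 then
          nums ++ [PySem.Int.toStr (3 ^ i.toNat)] else nums)
      acc = acc ++ pvEmit bits pre.length := by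
  induction bits with
  | nil =>
    intro pre acc
    simp [PySem.List.pyRange_one_eq_nil, pvEmit]
  | cons b bs ih =>
    intro pre acc
    rw [PySem.List.pyRange_one_cons (by simp only [List.length_append, List.length_cons]; push_cast; omega)]
    simp only [List.foldl_cons]
    have hget : PySem.List.pyGetD (pre ++ b :: bs) (pre.length : Int) 0 = b := by
      rw [PySem.List.pyGetD_natCast]
      simp [List.getD]
    rw [hget, pvEmit]
    have this := ih (pre ++ [b])
      (acc ++ (if b = 1 then [PySem.Int.toStr (3 ^ pre.length)] else []))
    simp only [List.append_assoc, List.singleton_append, List.length_append,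
      List.length_cons, List.length_nil] at this ⊢
    by_cases hb : b = 1
    · subst hb
      simp only [if_pos] at this ⊢
      simp only [Int.toNat_natCast]
      push_cast at this ⊢
      simpa using this
    · simp only [if_neg hb, List.append_nil] at this ⊢
      push_cast at this ⊢
      simpa using this

lemma pvAltEmit : ∀ (m : Nat) (n : Int), n.toNat = m → ∀ (k : Nat) (nums : List String),
    solveAltLoop n (3 ^ k) nums = nums ++ pvEmit (solveBits n) k := by
  intro m
  induction m using Nat.strong_induction_on with
  | _ m ih =>
    intro n hm k nums
    rw [solveAltLoop, solveBits]
    by_cases h : 0 < n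
    · simp only [dif_pos h]
      have hlt := pvFloordiv2_lt n h
      rw [show (3:Int) ^ k * 3 = 3 ^ (k + 1) from by ring,
          ih _ (hm ▸ hlt) _ rfl (k + 1), pvEmit]
      by_cases hb : PySem.Int.mod n 2 = 1 <;> simp only [hb] <;> simp
    · simp [dif_neg h, pvEmit]

lemma pvAltEmit' (n : Int) (k : Nat) (nums : List String) :
    solveAltLoop n (3 ^ k) nums = nums ++ pvEmit (solveBits n) k :=
  pvAltEmit n.toNat n rfl k nums

-- ===== VERDICT (by name: the statement is the Claim_ definition above) =====
theorem solve_spec : Claim_equal_solve := by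
  intro n _
  unfold Spec_solve solve solve_alt
  have hA := pvFoldA (solveBits n) [] []
  simp only [List.nil_append, List.length_nil, Nat.cast_zero] at hA
  have hB := pvAltEmit' n 0 []
  simp only [pow_zero, List.nil_append] at hB
  exact hA.trans hB.symm
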